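-- pv_equiv track=rewrite | github.com/hjh0915/toronto_assignments | 2019-a2/palindromes.py | is_palindrome_phrase
-- ===== SOURCE A (Python) =====
-- def is_palindrome_phrase(words: str) -> bool:
--     """即使words中有非字符，有大小写，也可以为回文
--     >>> is_palindrome_phrase("Madam, I'm Adam")
--     True
--     >>> is_palindrome_phrase("I'm a girl")
--     False
--     """
--     words = words.lower()
--     s = ""
--     for w in words:
--         if w.isalpha():
--             s += w
--     if s == s[::-1]:
--         return True
--     return False
-- ===== SOURCE B (Python) =====
-- def is_palindrome_phrase(words: str) -> bool:
--     letters = [c for c in words.lower() if c.isalpha()]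
--     lo, hi = 0, len(letters) - 1
--     while lo < hi:
--         if letters[lo] != letters[hi]:
--             return False
--         lo += 1
--         hi -= 1
--     return True
-- ===== Notes on version B (the rewrite author's own statement) =====
-- stated objective: alternative
-- what changed: Replaced A's build-filtered-string-by-repeated-concatenation-then-compare-with-its-reverse by a two-pointer index loop over the filtered letter list that compares the ends pairwise and moves inward, never materialising a reversed copy and stopping at the first mismatch.
import Mathlib
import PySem

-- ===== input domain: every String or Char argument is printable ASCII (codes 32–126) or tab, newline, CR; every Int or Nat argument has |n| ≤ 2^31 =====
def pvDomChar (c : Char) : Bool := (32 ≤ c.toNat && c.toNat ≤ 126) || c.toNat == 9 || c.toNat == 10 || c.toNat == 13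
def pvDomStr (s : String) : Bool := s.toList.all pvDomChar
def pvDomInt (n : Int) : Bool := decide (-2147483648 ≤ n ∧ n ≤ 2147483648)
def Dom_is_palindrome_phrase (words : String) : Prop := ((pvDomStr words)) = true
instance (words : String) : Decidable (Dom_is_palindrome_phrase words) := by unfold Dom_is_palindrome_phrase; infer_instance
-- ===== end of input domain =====

-- B replaces A's filtered-string-vs-its-reverse comparison by a two-pointer index loop over the filtered letters; same cost, no reversed copy.

-- ===== PORT A =====
-- A: lower the whole string, build s by appending alphabetic chars, compare s with s[::-1].
def is_palindrome_phrase (words : String) : Bool :=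
  let lw := (PySem.Str.lower words).toList
  let s := lw.foldl (fun acc w => if PySem.Chars.isalpha w then acc ++ [w] else acc) ([] : List Char)
  match PySem.List.slice? s none none (-1) with   -- s[::-1]
  | some r => if s = r then true else false
  | none => false    -- unreachable: step = -1 ≠ 0

-- ===== PORT B =====
-- two-pointer while-loop of Source B; indices lo < hi are always in range, getD is exact there
def pvTwoPtr (letters : List Char) (lo hi : Nat) : Bool :=
  if lo < hi then
    if letters.getD lo ' ' ≠ letters.getD hi ' ' then false
    else pvTwoPtr letters (lo + 1) (hi - 1)
  else true
termination_by hi - lo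
decreasing_by omega

def is_palindrome_phrase_alt (words : String) : Bool :=
  let letters := ((PySem.Str.lower words).toList).filter (fun c => PySem.Chars.isalpha c)
  pvTwoPtr letters 0 (letters.length - 1)

-- ===== PRECONDITION & SPEC =====
def Spec_is_palindrome_phrase (words : String) (out : Bool) : Prop := out = is_palindrome_phrase_alt words
instance (words : String) (out : Bool) : Decidable (Spec_is_palindrome_phrase words out) := by unfold Spec_is_palindrome_phrase; infer_instance

-- ===== CLAIM =====
def Claim_equal_is_palindrome_phrase : Prop := ∀ (words : String), Dom_is_palindrome_phrase words → Spec_is_palindrome_phrase words (is_palindrome_phrase words)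

-- ===== LEMMAS AND PROOFS =====

lemma pvTwoPtr_iff (l : List Char) :
    ∀ n lo hi, hi - lo ≤ n →
      (pvTwoPtr l lo hi = true ↔
        ∀ i, lo ≤ i → 2 * i < lo + hi → l.getD i ' ' = l.getD (lo + hi - i) ' ') := by
  intro n
  induction n with
  | zero =>
      intro lo hi h
      rw [pvTwoPtr]
      have hlt : ¬ lo < hi := by omega
      simp only [hlt, if_false]
      constructor
      · intro _ i hi1 hi2; omega
      · intro _; trivial
  | succ n ih =>
      intro lo hi h
      rw [pvTwoPtr]
      by_cases hlt : lo < hi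
      · simp only [hlt, if_true]
        by_cases hne : l.getD lo ' ' ≠ l.getD hi ' '
        · rw [if_pos hne]
          constructor
          · intro hf; exact absurd hf (by simp)
          · intro hall
            have := hall lo le_rfl (by omega)
            simp only [show lo + hi - lo = hi by omega] at this
            exact (hne this).elim
        · rw [if_neg hne]
          rw [ih (lo + 1) (hi - 1) (by omega)]
          rw [not_not] at hne
          constructor
          · intro hall i h1 h2
            rcases Nat.eq_or_lt_of_le h1 with rfl | h1'
            · simpa [show lo + hi - lo = hi by omega] using hne
            · have := hall i (by omega) (by omega)
              simpa [show lo + 1 + (hi - 1) = lo + hi by omega] using this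
          · intro hall i h1 h2
            have := hall i (by omega) (by omega)
            simpa [show lo + 1 + (hi - 1) = lo + hi by omega] using this
      · simp only [hlt, if_false]
        constructor
        · intro _ i hi1 hi2; omega
        · intro _; trivial

lemma rev_iff (l : List Char) :
    (l = l.reverse) ↔
      ∀ i, 0 ≤ i → 2 * i < 0 + (l.length - 1) → l.getD i ' ' = l.getD (0 + (l.length - 1) - i) ' ' := by
  constructor
  · intro hrev i _ h2
    have hi : i < l.length := by omega
    have hj : 0 + (l.length - 1) - i < l.length := by omega
    rw [List.getD_eq_getElem l ' ' hi, List.getD_eq_getElem l ' ' hj]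
    have h1 : l[i] = l.reverse[i]'(by simpa using hi) := List.getElem_of_eq hrev hi
    simp only [List.getElem_reverse] at h1
    rw [h1]
    congr 1
    omega
  · intro hall
    apply List.ext_getElem (by simp)
    intro i hi _
    rw [List.getElem_reverse]
    by_cases hc : 2 * i < l.length - 1
    · have := hall i (by omega) (by omega)
      rw [List.getD_eq_getElem l ' ' hi, List.getD_eq_getElem l ' ' (by omega)] at this
      simp only [show 0 + (l.length - 1) - i = l.length - 1 - i by omega] at this
      exact this
    · by_cases hm : 2 * i = l.length - 1
      · congr 1; omega
      · have h2 : 2 * (l.length - 1 - i) < l.length - 1 := by omega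
        have := hall (l.length - 1 - i) (by omega) (by omega)
        rw [List.getD_eq_getElem l ' ' (by omega), List.getD_eq_getElem l ' ' (by omega)] at this
        simp only [show 0 + (l.length - 1) - (l.length - 1 - i) = i by omega] at this
        exact this.symm

lemma pal_eq (l : List Char) :
    (if l = l.reverse then true else false) = pvTwoPtr l 0 (l.length - 1) := by
  by_cases h : l = l.reverse
  · rw [if_pos h]
    exact ((pvTwoPtr_iff l (l.length - 1) 0 (l.length - 1) le_rfl).mpr ((rev_iff l).mp h)).symm
  · rw [if_neg h]
    by_cases hp : pvTwoPtr l 0 (l.length - 1) = true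
    · exact absurd ((rev_iff l).mpr ((pvTwoPtr_iff l (l.length - 1) 0 (l.length - 1) le_rfl).mp hp)) h
    · simp only [Bool.not_eq_true] at hp
      rw [hp]

-- ===== VERDICT =====
theorem is_palindrome_phrase_spec : Claim_equal_is_palindrome_phrase := by
  intro words _
  unfold Spec_is_palindrome_phrase is_palindrome_phrase is_palindrome_phrase_alt
  simp only [PySem.List.foldl_append_if_eq_filter, PySem.List.slice?_none_none_neg_one,
    List.nil_append]
  exact pal_eq _
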